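-- pv_equiv track=rewrite | github.com/cdmismatch/cdmismatch | code/ana_compare_res.py | find_longest_head_mm_hop_v2
-- ===== SOURCE A (Python) =====
-- def find_longest_head_mm_hop_v2(comp_trace_list, bgp_path):
--     last_hop = None
--     while comp_trace_list:
--         if ' '.join(comp_trace_list) in bgp_path:
--             #return last_hop
--             return comp_trace_list[-1]
--         last_hop = comp_trace_list[-1]
--         comp_trace_list = comp_trace_list[:-1]
--     return None
-- ===== SOURCE B (Python) =====
-- def find_longest_head_mm_hop_v2(comp_trace_list, bgp_path):
--     # Binary search on prefix length: ' '.join of a prefix is a prefix of the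
--     # join of any longer prefix, so the substring test is monotone in length.
--     lo, hi = 0, len(comp_trace_list)
--     while lo < hi:
--         mid = (lo + hi + 1) // 2
--         if ' '.join(comp_trace_list[:mid]) in bgp_path:
--             lo = mid
--         else:
--             hi = mid - 1
--     return comp_trace_list[lo - 1] if lo > 0 else None
-- ===== Notes on version B (the rewrite author's own statement) =====
-- stated objective: faster
-- what changed: A rejoins and tests ever shorter prefixes one by one from the full list down; B binary-searches the prefix length, exploiting that the space-joined prefix being a substring of bgp_path is monotone in the prefix length.
import Mathlib
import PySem

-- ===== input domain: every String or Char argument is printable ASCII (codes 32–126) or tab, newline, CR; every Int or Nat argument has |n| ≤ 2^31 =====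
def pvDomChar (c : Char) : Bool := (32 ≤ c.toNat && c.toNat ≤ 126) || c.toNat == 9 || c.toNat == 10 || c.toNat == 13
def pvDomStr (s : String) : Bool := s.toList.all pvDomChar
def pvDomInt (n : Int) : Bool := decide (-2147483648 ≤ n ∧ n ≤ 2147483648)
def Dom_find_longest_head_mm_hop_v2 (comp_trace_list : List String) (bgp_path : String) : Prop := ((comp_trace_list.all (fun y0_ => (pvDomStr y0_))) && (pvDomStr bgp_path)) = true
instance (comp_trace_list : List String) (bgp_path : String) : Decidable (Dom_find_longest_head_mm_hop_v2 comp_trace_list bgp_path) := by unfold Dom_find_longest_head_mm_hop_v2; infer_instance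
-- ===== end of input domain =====

-- B replaces A's longest-to-shortest linear scan (re-joining the whole prefix each round)
-- by a binary search on the prefix length, exact because the substring test is monotone in length.

-- ===== PORT A =====
-- A's 'last_hop' variable is dead (its only use, 'return last_hop', is commented out), so it is not carried.
def find_longest_head_mm_hop_v2 (comp_trace_list : List String) (bgp_path : String) : Option String :=
  if _h : comp_trace_list = [] then none
  else if PySem.Str.isIn (PySem.Str.join " " comp_trace_list) bgp_path then
    PySem.List.pyGet? comp_trace_list (-1)
  else
    find_longest_head_mm_hop_v2 (PySem.List.slice comp_trace_list none (some (-1))) bgp_path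
termination_by comp_trace_list.length
decreasing_by
  rw [PySem.List.slice_to_neg_one]
  have h1 : comp_trace_list.dropLast.length = comp_trace_list.length - 1 := List.length_dropLast
  have h2 : comp_trace_list.length ≠ 0 := by simpa using _h
  omega

-- ===== PORT B =====
-- the binary-search loop of Source B: lo = largest known good prefix length, everything above hi is bad
def pvAltSearch (comp_trace_list : List String) (bgp_path : String) (lo hi : Nat) : Nat :=
  if _h : lo < hi then
    let mid := (lo + hi + 1) / 2
    if PySem.Str.isIn (PySem.Str.join " " (PySem.List.slice comp_trace_list none (some (mid : Int)))) bgp_path then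
      pvAltSearch comp_trace_list bgp_path mid hi
    else
      pvAltSearch comp_trace_list bgp_path lo (mid - 1)
  else lo
termination_by hi - lo
decreasing_by all_goals omega

def find_longest_head_mm_hop_v2_alt (comp_trace_list : List String) (bgp_path : String) : Option String :=
  let lo := pvAltSearch comp_trace_list bgp_path 0 comp_trace_list.length
  if 0 < lo then PySem.List.pyGet? comp_trace_list ((lo : Int) - 1) else none

-- ===== PRECONDITION & SPEC =====
def Spec_find_longest_head_mm_hop_v2 (comp_trace_list : List String) (bgp_path : String) (out : Option String) : Prop := out = find_longest_head_mm_hop_v2_alt comp_trace_list bgp_path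
instance (comp_trace_list : List String) (bgp_path : String) (out : Option String) : Decidable (Spec_find_longest_head_mm_hop_v2 comp_trace_list bgp_path out) := by unfold Spec_find_longest_head_mm_hop_v2; infer_instance

-- ===== CLAIM (what is proved, stated in full; the proofs are below) =====
def Claim_equal_find_longest_head_mm_hop_v2 : Prop := ∀ (comp_trace_list : List String) (bgp_path : String), Dom_find_longest_head_mm_hop_v2 comp_trace_list bgp_path → Spec_find_longest_head_mm_hop_v2 comp_trace_list bgp_path (find_longest_head_mm_hop_v2 comp_trace_list bgp_path)

-- ===== LEMMAS AND PROOFS =====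

-- the shared predicate: "the space-joined prefix of length k occurs in the path"
def pvOk (l : List String) (path : String) (k : Nat) : Bool :=
  PySem.Str.isIn (PySem.Str.join " " (l.take k)) path

-- a join of a prefix of the parts is a prefix of the join of all parts
theorem pv_join_prefix (sep : List Char) (xs ys : List (List Char)) :
    PySem.Chars.join sep xs <+: PySem.Chars.join sep (xs ++ ys) := by
  induction xs with
  | nil => simp [PySem.Chars.join_nil]
  | cons x xs ih =>
    cases xs with
    | nil =>
      cases ys with
      | nil => simp
      | cons y ys =>
        rw [PySem.Chars.join_singleton]
        simp only [List.singleton_append, PySem.Chars.join_cons_cons]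
        simp [List.append_assoc, List.prefix_append]
    | cons x' xs' =>
      simp only [List.cons_append, PySem.Chars.join_cons_cons]
      exact (List.prefix_append_right_inj (x ++ sep)).mpr (by simpa using ih)

-- monotonicity: a shorter prefix is still a substring
theorem pvOk_mono (l : List String) (path : String) {j k : Nat} (hjk : j ≤ k)
    (hk : pvOk l path k = true) : pvOk l path j = true := by
  rw [pvOk, PySem.Str.isIn_iff_infix] at hk ⊢
  refine List.IsPrefix.isInfix ?_ |>.trans hk
  rw [PySem.Str.toList_join, PySem.Str.toList_join]
  have e : l.take j = (l.take k).take j := by rw [List.take_take, Nat.min_eq_left hjk]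
  rw [e]
  have h := pv_join_prefix " ".toList (List.map String.toList ((l.take k).take j))
    (List.map String.toList ((l.take k).drop j))
  rw [← List.map_append, List.take_append_drop] at h
  exact h

-- Python's xs[-1] on a nonempty list is the last element
theorem pv_pyGet_neg_one {α : Type} (l : List α) (h : 1 ≤ l.length) :
    PySem.List.pyGet? l (-1) = l[l.length - 1]? := by
  simp [PySem.List.pyGet?, PySem.List.pyIdx?, h]

-- A's downward scan over a FIXED list, as a recursion on the prefix length
def pvDescend (l : List String) (path : String) : Nat → Option String
  | 0 => none
  | k+1 => if pvOk l path (k+1) then l[k]? else pvDescend l path k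

theorem pvOk_dropLast (l : List String) (path : String) {k : Nat} (hk : k ≤ l.length - 1) :
    pvOk l.dropLast path k = pvOk l path k := by
  rw [pvOk, pvOk, List.dropLast_eq_take, List.take_take, Nat.min_eq_left hk]

theorem pvDescend_dropLast (l : List String) (path : String) (k : Nat) (hk : k ≤ l.length - 1) :
    pvDescend l.dropLast path k = pvDescend l path k := by
  induction k with
  | zero => rfl
  | succ k ih =>
    rw [pvDescend, pvDescend, pvOk_dropLast l path hk, List.getElem?_dropLast,
      if_pos (show k < l.length - 1 by omega), ih (by omega)]

theorem pv_A_eq_descend (l : List String) (path : String) :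
    find_longest_head_mm_hop_v2 l path = pvDescend l path l.length := by
  induction hn : l.length using Nat.strong_induction_on generalizing l with
  | _ n ih =>
  subst hn
  rw [find_longest_head_mm_hop_v2]
  by_cases h : l = []
  · simp [h, pvDescend]
  · rw [dif_neg h]
    have hlen : l.length ≠ 0 := by simpa using h
    obtain ⟨m, hm⟩ : ∃ m, l.length = m + 1 := ⟨l.length - 1, by omega⟩
    have hok : PySem.Str.isIn (PySem.Str.join " " l) path = pvOk l path (m+1) := by
      rw [pvOk, ← hm, List.take_length]
    rw [hm, pvDescend, ← hok]
    by_cases hin : PySem.Str.isIn (PySem.Str.join " " l) path = true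
    · rw [if_pos hin, if_pos hin, pv_pyGet_neg_one l (by omega), hm, Nat.add_sub_cancel]
    · rw [if_neg hin, if_neg hin, PySem.List.slice_to_neg_one,
        ih l.dropLast.length (by rw [List.length_dropLast]; omega) l.dropLast rfl,
        List.length_dropLast, hm, Nat.add_sub_cancel,
        pvDescend_dropLast l path m (by omega)]

theorem pvDescend_skip (l : List String) (path : String) (k r : Nat) (hrk : r ≤ k)
    (hfalse : ∀ m, r < m → m ≤ k → pvOk l path m = false) :
    pvDescend l path k = pvDescend l path r := by
  induction k with
  | zero => rw [Nat.le_zero.mp hrk]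
  | succ k ih =>
    by_cases h : r = k + 1
    · rw [h]
    · rw [pvDescend, hfalse (k+1) (by omega) le_rfl, if_neg (by simp)]
      exact ih (by omega) (fun m h1 h2 => hfalse m h1 (by omega))

-- the binary search returns the largest good prefix length
theorem pvAltSearch_correct_aux (l : List String) (path : String) :
    ∀ d lo hi, hi - lo ≤ d → lo ≤ hi → hi ≤ l.length → pvOk l path lo = true →
    (∀ m, hi < m → m ≤ l.length → pvOk l path m = false) →
    pvOk l path (pvAltSearch l path lo hi) = true ∧
    pvAltSearch l path lo hi ≤ hi ∧
    (∀ m, pvAltSearch l path lo hi < m → m ≤ l.length → pvOk l path m = false) := by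
  intro d
  induction d with
  | zero =>
    intro lo hi hd hlohi hhin hlo hhi
    have : lo = hi := by omega
    rw [pvAltSearch, dif_neg (by omega)]
    exact ⟨hlo, le_of_eq this, this ▸ hhi⟩
  | succ d ihd =>
    intro lo hi hd hlohi hhin hlo hhi
    rw [pvAltSearch]
    by_cases h : lo < hi
    · rw [dif_pos h]
      have hmid1 : lo < (lo + hi + 1) / 2 := by omega
      have hmid2 : (lo + hi + 1) / 2 ≤ hi := by omega
      have hslice : PySem.List.slice l none (some (((lo + hi + 1) / 2 : Nat) : Int)) =
          l.take ((lo + hi + 1) / 2) := by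
        rw [PySem.List.slice_to l (by positivity), Int.toNat_natCast]
      simp only [hslice]
      by_cases hok : pvOk l path ((lo + hi + 1) / 2) = true
      · rw [if_pos (by rw [← pvOk]; exact hok)]
        exact ihd _ _ (by omega) hmid2 hhin hok hhi
      · rw [if_neg (by rw [← pvOk]; exact hok)]
        obtain ⟨c1, c2, c3⟩ := ihd lo ((lo + hi + 1) / 2 - 1) (by omega) (by omega) (by omega)
          hlo (by
            intro m h1 h2
            by_cases hm : hi < m
            · exact hhi m hm h2
            · by_contra hc
              exact hok (pvOk_mono l path (j := (lo + hi + 1) / 2) (k := m) (by omega)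
                (by simpa using hc)))
        exact ⟨c1, by omega, c3⟩
    · rw [dif_neg h]
      have : lo = hi := by omega
      exact ⟨hlo, le_of_eq this, this ▸ hhi⟩

-- ===== VERDICT (by name: the statement is the Claim_ definition above) =====
theorem find_longest_head_mm_hop_v2_spec : Claim_equal_find_longest_head_mm_hop_v2 := by
  intro l path _
  unfold Spec_find_longest_head_mm_hop_v2 find_longest_head_mm_hop_v2_alt
  have h0 : pvOk l path 0 = true := by
    rw [pvOk, List.take_zero, PySem.Str.isIn_iff_infix, PySem.Str.toList_join]
    simp [PySem.Chars.join_nil]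
  obtain ⟨hok, hle, hfalse⟩ := pvAltSearch_correct_aux l path (l.length - 0) 0 l.length
    le_rfl (Nat.zero_le _) le_rfl h0 (fun m h1 h2 => absurd h1 (by omega))
  rw [pv_A_eq_descend, pvDescend_skip l path l.length _ hle hfalse]
  show pvDescend l path (pvAltSearch l path 0 l.length) =
    if 0 < pvAltSearch l path 0 l.length then
      PySem.List.pyGet? l ((pvAltSearch l path 0 l.length : Int) - 1) else none
  revert hok hle hfalse
  generalize pvAltSearch l path 0 l.length = r
  intro hok hle hfalse
  cases r with
  | zero => simp [pvDescend]
  | succ j =>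
    rw [pvDescend, if_pos hok, if_pos (by omega)]
    have hc : ((j + 1 : Nat) : Int) - 1 = ((j : Nat) : Int) := by push_cast; ring
    rw [hc, PySem.List.pyGet?_natCast]
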